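-- pv_equiv track=rewrite | github.com/AlexanderJCS/gold-finder | src/gold_finder/gold_finder.py | get_perimeter_coords
-- ===== SOURCE A (Python) =====
-- def get_perimeter_coords(splotch_coords: set[tuple[int, int]]) -> set[tuple[int, int]]:
--     """
--     Returns the coordinates of the perimeter of the splotch
--
--     :param splotch_coords: A set of coordinates that are part of the splotch
--     :return: A set of coordinates that are part of the perimeter of the splotch
--     """
--
--     perimeter_coords = set()
--
--     for coord in splotch_coords:
--         for offset in ((-1, 0), (1, 0), (0, -1), (0, 1)):
--             new_coords = (coord[0] + offset[0], coord[1] + offset[1])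
--
--             # You can also check for black pixels here - might be faster.
--             # Only employ this optimization if you run into performance issues
--             if new_coords not in splotch_coords:
--                 perimeter_coords.add(coord)
--                 break
--
--     return perimeter_coords
-- ===== SOURCE B (Python) =====
-- def get_perimeter_coords(splotch_coords: set[tuple[int, int]]) -> set[tuple[int, int]]:
--     """Neighbor-counting: one pass tallies, for every cell of the plane, how many of
--     its 4-neighbors belong to the splotch; a splotch cell is on the perimeter exactly
--     when its tally is below 4 (some neighbor is missing)."""
--     counts = {}
--     for x, y in splotch_coords:
--         for n in ((x - 1, y), (x + 1, y), (x, y - 1), (x, y + 1)):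
--             counts[n] = counts.get(n, 0) + 1
--     return {c for c in splotch_coords if counts.get(c, 0) < 4}
-- ===== Notes on version B (the rewrite author's own statement) =====
-- stated objective: alternative
-- what changed: Replaced the per-cell membership test of the four neighbors (with break) by a counting pass: a dict tallies for each cell how many splotch neighbors it has, then splotch cells with a tally below 4 are the perimeter - no membership test on the splotch at all.
import Mathlib
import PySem

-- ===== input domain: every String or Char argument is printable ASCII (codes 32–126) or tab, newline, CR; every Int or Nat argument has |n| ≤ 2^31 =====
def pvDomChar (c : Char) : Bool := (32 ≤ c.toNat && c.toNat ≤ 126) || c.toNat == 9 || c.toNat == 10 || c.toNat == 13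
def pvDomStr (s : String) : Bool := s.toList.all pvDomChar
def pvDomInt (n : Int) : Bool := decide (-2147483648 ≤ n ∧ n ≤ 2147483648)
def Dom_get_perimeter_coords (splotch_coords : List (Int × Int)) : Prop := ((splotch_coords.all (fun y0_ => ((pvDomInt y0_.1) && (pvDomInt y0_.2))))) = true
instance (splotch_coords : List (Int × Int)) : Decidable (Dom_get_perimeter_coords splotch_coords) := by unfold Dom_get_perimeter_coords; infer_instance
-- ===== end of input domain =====

-- B replaces A's per-cell membership test of the four neighbors by one counting pass
-- (a dict tallying each cell's number of splotch neighbors) plus a tally-below-4 filter;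
-- objective: alternative. Outputs are Python sets (distinct-element lists, compared as sets).

-- ===== PORT A =====
-- per-cell loop: a cell joins the perimeter at the first of the 4 offsets whose
-- neighbor is missing from the splotch (the break = List.any's first hit)
def get_perimeter_coords (splotch_coords : List (Int × Int)) : List (Int × Int) :=
  splotch_coords.foldl
    (fun perimeter_coords coord =>
      if ([((-1 : Int), (0 : Int)), (1, 0), (0, -1), (0, 1)]).any
          (fun offset => !(decide ((coord.1 + offset.1, coord.2 + offset.2) ∈ splotch_coords)))
      then PySem.Set.add perimeter_coords coord
      else perimeter_coords)
    PySem.Set.empty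

-- ===== PORT B =====
-- the tuple of the four neighbor cells of (x, y) generated in Source B's inner loop
def pvNbrs (c : Int × Int) : List (Int × Int) :=
  [(c.1 - 1, c.2), (c.1 + 1, c.2), (c.1, c.2 - 1), (c.1, c.2 + 1)]

-- Source B iterates the input SET twice; its distinct elements are Set.ofList splotch_coords
def get_perimeter_coords_alt (splotch_coords : List (Int × Int)) : List (Int × Int) :=
  let s := PySem.Set.ofList splotch_coords
  let counts : PySem.Dict (Int × Int) Int :=
    s.foldl
      (fun counts c =>
        (pvNbrs c).foldl (fun counts n => counts.insert n (counts.getD n 0 + 1)) counts)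
      PySem.Dict.empty
  PySem.Set.ofList (s.filter (fun c => decide (counts.getD c 0 < 4)))

-- ===== PRECONDITION & SPEC =====
def Spec_get_perimeter_coords (splotch_coords : List (Int × Int)) (out : List (Int × Int)) : Prop := out = get_perimeter_coords_alt splotch_coords
instance (splotch_coords : List (Int × Int)) (out : List (Int × Int)) : Decidable (Spec_get_perimeter_coords splotch_coords out) := by unfold Spec_get_perimeter_coords; infer_instance

-- ===== CLAIM (what is proved, stated in full; the proofs are below) =====
def Claim_equal_get_perimeter_coords : Prop := ∀ (splotch_coords : List (Int × Int)), Dom_get_perimeter_coords splotch_coords → Spec_get_perimeter_coords splotch_coords (get_perimeter_coords splotch_coords)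

-- ===== LEMMAS AND PROOFS =====

-- the four neighbors of a cell are pairwise distinct
theorem pv_nbrs_nodup (c : Int × Int) : (pvNbrs c).Nodup := by
  simp [pvNbrs, Prod.ext_iff]
  omega

-- the neighbor relation is symmetric, so pvNbrs x contains c (0 or 1 times) iff x ∈ pvNbrs c
theorem pv_count_nbrs (x c : Int × Int) :
    (pvNbrs x).count c = if x ∈ pvNbrs c then 1 else 0 := by
  rcases x with ⟨x1, x2⟩
  rcases c with ⟨c1, c2⟩
  simp [pvNbrs, List.count_cons, Prod.ext_iff]
  split_ifs <;> omega

-- |l ∩ N| read off either list, for Nodup lists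
theorem pv_countP_swap (l N : List (Int × Int)) (hl : l.Nodup) (hN : N.Nodup) :
    l.countP (fun x => decide (x ∈ N)) = N.countP (fun n => decide (n ∈ l)) := by
  rw [List.countP_eq_length_filter, List.countP_eq_length_filter]
  rw [← List.toFinset_card_of_nodup (hl.filter _), ← List.toFinset_card_of_nodup (hN.filter _)]
  have h1 : (l.filter (fun x => decide (x ∈ N))).toFinset = l.toFinset ∩ N.toFinset := by
    ext a; simp [List.mem_filter]
  have h2 : (N.filter (fun n => decide (n ∈ l))).toFinset = N.toFinset ∩ l.toFinset := by
    ext a; simp [List.mem_filter]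
  rw [h1, h2, Finset.inter_comm]

theorem pv_filter_add_pos {α : Type} [BEq α] [LawfulBEq α] (p : α → Bool) (acc : List α)
    (c : α) (hp : p c = true) :
    (PySem.Set.add acc c).filter p = PySem.Set.add (acc.filter p) c := by
  by_cases hm : c ∈ acc
  · simp [PySem.Set.add, PySem.Set.contains, hm, hp]
  · simp [PySem.Set.add, PySem.Set.contains, hm, List.filter_append, hp]

theorem pv_filter_add_neg {α : Type} [BEq α] [LawfulBEq α] (p : α → Bool) (acc : List α)
    (c : α) (hp : p c = false) :
    (PySem.Set.add acc c).filter p = acc.filter p := by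
  by_cases hm : c ∈ acc
  · simp [PySem.Set.add, PySem.Set.contains, hm]
  · simp [PySem.Set.add, PySem.Set.contains, hm, List.filter_append, hp]

-- filtering commutes with building a set by repeated add
theorem pv_filter_foldl_add {α : Type} [BEq α] [LawfulBEq α] (p : α → Bool) (s : List α) :
    ∀ acc : List α,
      (s.foldl PySem.Set.add acc).filter p
        = (s.filter p).foldl PySem.Set.add (acc.filter p) := by
  induction s with
  | nil => intro acc; rfl
  | cons c t ih =>
    intro acc
    by_cases hp : p c
    · simp only [List.foldl_cons, List.filter_cons, hp, if_true]
      rw [ih, pv_filter_add_pos p acc c hp]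
    · have hp' : p c = false := by simpa using hp
      simp only [List.foldl_cons, List.filter_cons, hp', Bool.false_eq_true, if_false]
      rw [ih, pv_filter_add_neg p acc c hp']

theorem pv_ofList_filter {α : Type} [BEq α] [LawfulBEq α] (p : α → Bool) (s : List α) :
    (PySem.Set.ofList s).filter p = PySem.Set.ofList (s.filter p) := by
  rw [PySem.Set.ofList_eq_foldl, PySem.Set.ofList_eq_foldl, pv_filter_foldl_add]
  rfl

-- B's tally at a splotch cell c is the number of distinct splotch cells adjacent to c
theorem pv_counts_getD (l : List (Int × Int)) (c : Int × Int) :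
    ((PySem.Set.ofList l).foldl
        (fun counts x =>
          (pvNbrs x).foldl (fun counts n => counts.insert n (counts.getD n 0 + 1)) counts)
        PySem.Dict.empty).getD c 0
      = ((pvNbrs c).countP (fun n => decide (n ∈ l)) : Int) := by
  rw [← List.foldl_flatMap, PySem.Dict.getD_foldl_insert_add_one]
  have hcnt : ((PySem.Set.ofList l).flatMap pvNbrs).count c
      = (pvNbrs c).countP (fun n => decide (n ∈ l)) := by
    rw [List.count_flatMap]
    have hmap : (PySem.Set.ofList l).map (List.count c ∘ pvNbrs)
        = (PySem.Set.ofList l).map (fun x => if decide (x ∈ pvNbrs c) then 1 else 0) := by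
      apply List.map_congr_left
      intro x _
      simpa using pv_count_nbrs x c
    rw [hmap, PySem.List.sum_map_ite_one_zero_nat]
    rw [pv_countP_swap _ _ (PySem.Set.nodup_ofList l) (pv_nbrs_nodup c)]
    apply List.countP_congr
    intro n _
    simp [PySem.Set.mem_ofList]
  rw [hcnt]
  simp [pysem]

-- ===== VERDICT (by name: the statement is the Claim_ definition above) =====
theorem get_perimeter_coords_spec : Claim_equal_get_perimeter_coords := by
  intro l _
  unfold Spec_get_perimeter_coords get_perimeter_coords get_perimeter_coords_alt
  dsimp only [PySem.Set.empty]
  rw [PySem.List.foldl_if_eq_foldl_filter, ← PySem.Set.ofList_eq_foldl]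
  rw [pv_ofList_filter, PySem.Set.ofList_eq_self_of_nodup _ (PySem.Set.nodup_ofList _)]
  congr 1
  apply List.filter_congr
  intro c _
  rw [pv_counts_getD l c]
  rw [Bool.eq_iff_iff]
  simp only [List.any_cons, List.any_nil, Bool.or_false, Bool.or_eq_true, Bool.not_eq_true',
    decide_eq_false_iff_not, decide_eq_true_eq, pvNbrs, List.countP_cons, List.countP_nil]
  have e1 : (c.1 + (-1 : Int), c.2 + (0 : Int)) = (c.1 - 1, c.2) := by
    simp [Prod.ext_iff]; omega
  have e2 : (c.1 + (1 : Int), c.2 + (0 : Int)) = (c.1 + 1, c.2) := by simp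
  have e3 : (c.1 + (0 : Int), c.2 + (-1 : Int)) = (c.1, c.2 - 1) := by
    simp [Prod.ext_iff]; omega
  have e4 : (c.1 + (0 : Int), c.2 + (1 : Int)) = (c.1, c.2 + 1) := by simp
  rw [e1, e2, e3, e4]
  by_cases h1 : (c.1 - 1, c.2) ∈ l <;> by_cases h2 : (c.1 + 1, c.2) ∈ l <;>
    by_cases h3 : (c.1, c.2 - 1) ∈ l <;> by_cases h4 : (c.1, c.2 + 1) ∈ l <;>
    simp [h1, h2, h3, h4]
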